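-- pv_equiv track=rewrite | github.com/MicheleMolineri/4A_ROB_Sistemi_E_Reti- | Pitone/EsPitone/es061_RobotMattonelle.py | contaCelleLibere
-- ===== SOURCE A (Python) =====
-- def contaCelleLibere(campo):
--     #numerare celle libere
--     dizionarioAdiacenze, conta={}, 0
--
--     for r in range(len(campo)):
--         for c in range(len(campo)):
--             if campo[r][c] == 0:
--                 conta += 1
--                 dizionarioAdiacenze[conta-1] = []
--
--     return conta,dizionarioAdiacenze
-- ===== SOURCE B (Python) =====
-- def contaCelleLibere(campo):
--     # Column-major alternative: build the transposed grid (a list of columns) first,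
--     # count the zeros column by column with the built-in list.count, then build the
--     # empty-adjacency dict in a separate pass.
--     n = len(campo)
--     cols = [[row[c] for row in campo] for c in range(n)]
--     conta = sum(col.count(0) for col in cols)
--     return conta, {i: [] for i in range(conta)}
-- ===== Notes on version B (the rewrite author's own statement) =====
-- stated objective: alternative
-- what changed: B traverses the grid column-major: it builds the transposed grid (a list of columns) with one comprehension, sums the built-in zero count of each column, and then builds the empty-adjacency dict in a separate comprehension over range(conta), instead of A's row-major nested index loops that grow the dict cell by cell.
import Mathlib
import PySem

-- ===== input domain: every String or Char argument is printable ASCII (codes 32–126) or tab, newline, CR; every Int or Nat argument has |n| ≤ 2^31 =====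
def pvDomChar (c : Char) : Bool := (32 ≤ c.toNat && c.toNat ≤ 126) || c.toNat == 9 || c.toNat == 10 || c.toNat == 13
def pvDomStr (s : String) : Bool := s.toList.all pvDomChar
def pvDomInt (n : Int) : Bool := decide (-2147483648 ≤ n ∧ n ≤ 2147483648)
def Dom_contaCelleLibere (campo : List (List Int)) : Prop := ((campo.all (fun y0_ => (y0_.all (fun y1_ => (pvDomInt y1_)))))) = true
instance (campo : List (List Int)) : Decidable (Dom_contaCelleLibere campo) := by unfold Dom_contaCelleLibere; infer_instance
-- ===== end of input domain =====

-- B traverses the grid column-major: it builds the transposed grid (the list of columns)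
-- first, counts each column's zeros with the list-count primitive, and then builds the
-- empty-adjacency dict in a separate pass -- instead of A's row-major nested index loops
-- growing the dict cell by cell (alternative; same cost).

-- ===== PORT A =====
def contaCelleLibere (campo : List (List Int)) : Int × (List (Int × List Int)) :=
  let n : Int := (campo.length : Int)
  let st :=
    (PySem.List.pyRange 0 n 1).foldl (fun st r =>
      (PySem.List.pyRange 0 n 1).foldl (fun st c =>
        if PySem.List.pyGetD (PySem.List.pyGetD campo r []) c 0 == 0 then
          (st.1 + 1, st.2.insert (st.1 + 1 - 1) ([] : List Int))
        else st) st)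
      ((0 : Int), (PySem.Dict.mk [] : PySem.Dict Int (List Int)))
  (st.1, st.2.items)

-- ===== PORT B =====
def contaCelleLibere_alt (campo : List (List Int)) : Int × (List (Int × List Int)) :=
  let n : Int := (campo.length : Int)
  let cols := (PySem.List.pyRange 0 n 1).map (fun c =>
    campo.map (fun row => PySem.List.pyGetD row c 0))
  let conta : Int := (cols.map (fun col => (PySem.List.count col 0 : Int))).sum
  (conta, (PySem.List.pyRange 0 conta 1).map (fun i => (i, ([] : List Int))))

-- ===== PRECONDITION & SPEC =====
-- Python A indexes campo[r][c] for all r, c below len(campo): it raises IndexError exactly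
-- when some row is shorter than len(campo); those inputs are excluded.
def Pre_contaCelleLibere (campo : List (List Int)) : Prop :=
  ∀ row ∈ campo, campo.length ≤ row.length
instance (campo : List (List Int)) : Decidable (Pre_contaCelleLibere campo) := by unfold Pre_contaCelleLibere; infer_instance
def pvWitness_contaCelleLibere : List (List Int) := [[0, 1], [1, 0]]

def Spec_contaCelleLibere (campo : List (List Int)) (out : Int × (List (Int × List Int))) : Prop := out = contaCelleLibere_alt campo
instance (campo : List (List Int)) (out : Int × (List (Int × List Int))) : Decidable (Spec_contaCelleLibere campo out) := by unfold Spec_contaCelleLibere; infer_instance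

-- ===== CLAIM (what is proved, stated in full; the proofs are below) =====
def Claim_equal_contaCelleLibere : Prop := ∀ (campo : List (List Int)), Dom_contaCelleLibere campo → Pre_contaCelleLibere campo → Spec_contaCelleLibere campo (contaCelleLibere campo)
-- ===== LEMMAS AND PROOFS =====

-- the dict A has built after conta has reached k: keys 0 .. k-1, each mapped to []
def pvD (k : Int) : PySem.Dict Int (List Int) :=
  PySem.Dict.mk ((PySem.List.pyRange 0 k 1).map (fun i => (i, ([] : List Int))))

lemma pvD_not_contains (k : Int) : (pvD k).contains k = false := by
  simp [pvD, PySem.Dict.contains, List.any_eq, PySem.List.mem_pyRange_one]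

lemma pvD_insert (k : Int) (hk : 0 ≤ k) : (pvD k).insert k ([] : List Int) = pvD (k + 1) := by
  have h := PySem.Dict.items_insert_of_not_contains (pvD k) ([] : List Int) (pvD_not_contains k)
  calc (pvD k).insert k ([] : List Int)
      = PySem.Dict.mk (((pvD k).insert k ([] : List Int)).items) := rfl
    _ = pvD (k + 1) := by
        rw [h]
        simp only [pvD]
        rw [PySem.List.pyRange_one_succ_right hk]
        simp

-- A's inner loop, for an arbitrary predicate, starting from the canonical state (k, pvD k)
lemma pv_inner (p : Int → Bool) :
    ∀ (cs : List Int) (k : Int), 0 ≤ k →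
      cs.foldl (fun st c =>
          if p c then (st.1 + 1, st.2.insert (st.1 + 1 - 1) ([] : List Int)) else st)
        (k, pvD k)
      = (k + (cs.countP p : Int), pvD (k + (cs.countP p : Int))) := by
  intro cs
  induction cs with
  | nil => intro k hk; simp
  | cons c cs ih =>
    intro k hk
    by_cases hp : p c = true
    · have hkey : k + 1 - 1 = k := by ring
      simp only [List.foldl_cons, hp, if_true, hkey, pvD_insert k hk]
      rw [ih (k + 1) (by omega)]
      have harg : k + 1 + (cs.countP p : Int) = k + (((c :: cs).countP p : Nat) : Int) := by
        simp [hp]; ring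
      rw [harg]
    · have hp' : p c = false := by simpa using hp
      simp only [List.foldl_cons, hp', Bool.false_eq_true, if_false]
      rw [ih k hk]
      simp [hp']

-- A's outer loop: the count accumulates the per-row counts, the dict stays canonical
lemma pv_outer (n : Int) (g : Int → Int → Bool) :
    ∀ (rs : List Int) (k : Int), 0 ≤ k →
      rs.foldl (fun st r =>
          (PySem.List.pyRange 0 n 1).foldl (fun st c =>
            if g r c then (st.1 + 1, st.2.insert (st.1 + 1 - 1) ([] : List Int)) else st) st)
        (k, pvD k)
      = (k + (rs.map (fun r => (((PySem.List.pyRange 0 n 1).countP (g r) : Nat) : Int))).sum,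
         pvD (k + (rs.map (fun r => (((PySem.List.pyRange 0 n 1).countP (g r) : Nat) : Int))).sum)) := by
  intro rs
  induction rs with
  | nil => intro k hk; simp
  | cons r rs ih =>
    intro k hk
    simp only [List.foldl_cons]
    rw [pv_inner (g r) _ k hk, ih _ (by omega)]
    have harg : k + ((((PySem.List.pyRange 0 n 1).countP (g r) : Nat) : Int)) +
        (rs.map (fun r => (((PySem.List.pyRange 0 n 1).countP (g r) : Nat) : Int))).sum
      = k + ((r :: rs).map (fun r => (((PySem.List.pyRange 0 n 1).countP (g r) : Nat) : Int))).sum := by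
      simp [List.map_cons, List.sum_cons]; ring
    rw [harg]

-- countP as a 0/1 sum
lemma pv_countP_eq_sum {α : Type} (l : List α) (p : α → Bool) :
    l.countP p = (l.map (fun x => if p x then 1 else 0)).sum := by
  induction l with
  | nil => simp
  | cons x xs ih =>
    simp only [List.countP_cons, List.map_cons, List.sum_cons, ih]
    split_ifs <;> omega

-- Nat sums split pointwise
lemma pv_sum_map_add {α : Type} (l : List α) (f g : α → Nat) :
    (l.map (fun x => f x + g x)).sum = (l.map f).sum + (l.map g).sum := by
  induction l with
  | nil => simp
  | cons x xs ih => simp only [List.map_cons, List.sum_cons, ih]; omega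

-- the sum swap: row-major and column-major counting agree
lemma pv_swap (rows : List (List Int)) (cs : List Int) (p : List Int → Int → Bool) :
    (rows.map (fun row => cs.countP (p row))).sum
      = (cs.map (fun c => rows.countP (fun row => p row c))).sum := by
  induction rows with
  | nil => simp
  | cons r rs ih =>
    simp only [List.map_cons, List.sum_cons, ih]
    have hcol : (fun c => (r :: rs).countP (fun row => p row c))
        = fun c => (if p r c then 1 else 0) + rs.countP (fun row => p row c) := by
      funext c
      simp only [List.countP_cons]
      split_ifs <;> omega
    rw [hcol, pv_sum_map_add, ← pv_countP_eq_sum]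

-- casting a Nat-valued summand list to Int commutes with the sum
lemma pv_sum_cast {α : Type} (l : List α) (f : α → Nat) :
    (l.map (fun x => ((f x : Nat) : Int))).sum = (((l.map f).sum : Nat) : Int) := by
  induction l with
  | nil => simp
  | cons x xs ih => simp [ih]

-- ===== VERDICT (by name: the statement is the Claim_ definition above) =====
theorem contaCelleLibere_spec : Claim_equal_contaCelleLibere := by
  intro campo _ hpre
  unfold Spec_contaCelleLibere contaCelleLibere contaCelleLibere_alt
  simp only []
  rw [show (PySem.Dict.mk [] : PySem.Dict Int (List Int)) = pvD 0 from rfl]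
  rw [pv_outer ((campo.length : Nat) : Int)
        (fun r c => PySem.List.pyGetD (PySem.List.pyGetD campo r []) c 0 == 0)
        (PySem.List.pyRange 0 ((campo.length : Nat) : Int) 1) 0 le_rfl]
  -- A's count: per-row counts over row indices become per-row counts over the rows
  have hS : (PySem.List.pyRange 0 ((campo.length : Nat) : Int) 1).map
        (fun r => (((PySem.List.pyRange 0 ((campo.length : Nat) : Int) 1).countP
          (fun c => PySem.List.pyGetD (PySem.List.pyGetD campo r []) c 0 == 0) : Nat) : Int))
      = campo.map (fun row =>
          (((PySem.List.pyRange 0 ((campo.length : Nat) : Int) 1).countP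
            (fun c => PySem.List.pyGetD row c 0 == 0) : Nat) : Int)) := by
    conv_lhs => rw [show (fun r => (((PySem.List.pyRange 0 ((campo.length : Nat) : Int) 1).countP
        (fun c => PySem.List.pyGetD (PySem.List.pyGetD campo r []) c 0 == 0) : Nat) : Int))
      = (fun row => (((PySem.List.pyRange 0 ((campo.length : Nat) : Int) 1).countP
          (fun c => PySem.List.pyGetD row c 0 == 0) : Nat) : Int)) ∘ (fun j => PySem.List.pyGetD campo j ([] : List Int)) from rfl]
    rw [← List.map_map, PySem.List.map_pyGetD_pyRange_zero' campo ([] : List Int)]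
  rw [hS]
  -- the sum swap: A's row-major count equals B's column-major count
  have hsum : (campo.map (fun row =>
        (((PySem.List.pyRange 0 ((campo.length : Nat) : Int) 1).countP
          (fun c => PySem.List.pyGetD row c 0 == 0) : Nat) : Int))).sum
      = (((PySem.List.pyRange 0 ((campo.length : Nat) : Int) 1).map (fun c =>
            campo.map (fun row => PySem.List.pyGetD row c 0))).map
          (fun col => ((PySem.List.count col (0 : Int) : Nat) : Int))).sum := by
    rw [List.map_map]
    simp only [Function.comp_def]
    rw [pv_sum_cast campo (fun row =>
          (PySem.List.pyRange 0 ((campo.length : Nat) : Int) 1).countP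
            (fun c => PySem.List.pyGetD row c 0 == 0)),
        pv_sum_cast (PySem.List.pyRange 0 ((campo.length : Nat) : Int) 1) (fun c =>
          PySem.List.count (campo.map (fun row => PySem.List.pyGetD row c 0)) (0 : Int))]
    have hnat : (campo.map (fun row =>
          (PySem.List.pyRange 0 ((campo.length : Nat) : Int) 1).countP
            (fun c => PySem.List.pyGetD row c 0 == 0))).sum
        = ((PySem.List.pyRange 0 ((campo.length : Nat) : Int) 1).map (fun c =>
            PySem.List.count (campo.map (fun row => PySem.List.pyGetD row c 0)) (0 : Int))).sum := by
      rw [pv_swap campo (PySem.List.pyRange 0 ((campo.length : Nat) : Int) 1)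
            (fun row c => PySem.List.pyGetD row c 0 == 0)]
      apply congrArg
      apply List.map_congr_left
      intro c _
      rw [PySem.List.count_eq, List.count_eq_countP, List.countP_map]
      rfl
    exact_mod_cast hnat
  rw [hsum]
  simp [pvD]
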